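-- pv_equiv track=rewrite | github.com/cpwoo/CodeTest | Python/programmers/etc/level1/덧칠하기.py | solution
-- ===== SOURCE A (Python) =====
-- def solution(n, m, section):
--     answer = 0
--     while section:
--         end = section.pop()
--         while section and section[-1] > end-m:
--             section.pop()
--         answer += 1
--     return answer
-- ===== SOURCE B (Python) =====
-- def solution(n, m, section):
--     # Flat reverse scan with a maintained boundary instead of A's nested pop loops.
--     answer = 0
--     cover = None  # leftmost column already painted
--     for x in reversed(section):
--         if cover is None or x < cover:
--             answer += 1
--             cover = x - m + 1
--     return answer
-- ===== Notes on version B (the rewrite author's own statement) =====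
-- stated objective: simpler
-- what changed: Replaces A's nested while/pop loops (which empty section in place) with a single flat reverse scan maintaining the leftmost painted column as scalar state.
import Mathlib
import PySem

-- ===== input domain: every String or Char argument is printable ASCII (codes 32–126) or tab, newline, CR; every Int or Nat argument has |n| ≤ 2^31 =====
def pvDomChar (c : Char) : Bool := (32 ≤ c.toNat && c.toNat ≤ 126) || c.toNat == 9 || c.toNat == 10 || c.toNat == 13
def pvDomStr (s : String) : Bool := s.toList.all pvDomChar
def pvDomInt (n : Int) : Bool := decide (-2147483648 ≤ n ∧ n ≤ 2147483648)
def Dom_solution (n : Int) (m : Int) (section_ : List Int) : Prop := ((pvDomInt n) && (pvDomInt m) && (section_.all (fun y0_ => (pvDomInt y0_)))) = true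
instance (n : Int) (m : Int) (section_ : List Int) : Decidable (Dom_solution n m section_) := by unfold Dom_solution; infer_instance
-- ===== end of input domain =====

-- B replaces A's nested while/pop loops by one flat reverse scan with a scalar boundary (simpler);
-- return-value equivalence only: A empties `section` in place, B leaves it untouched.

-- ===== PORT A =====
-- inner while: `while section and section[-1] > end-m: section.pop()`
def solInner (xs : List Int) (thr : Int) : List Int :=
  match h : xs.getLast? with
  | none => xs
  | some x => if x > thr then solInner xs.dropLast thr else xs
termination_by xs.length
decreasing_by
  have hne : xs ≠ [] := by intro hx; simp [hx] at h
  have := List.length_pos_iff.mpr hne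
  simp [List.length_dropLast]; omega

theorem solInner_length_le (xs : List Int) (thr : Int) :
    (solInner xs thr).length ≤ xs.length := by
  fun_induction solInner xs thr with
  | case1 => exact le_rfl
  | case2 xs h x hx ih =>
      have : xs.dropLast.length ≤ xs.length := by
        simp [List.length_dropLast]
      omega
  | case3 => exact le_rfl

-- outer while: pop `end`, run the inner skip loop, count one stroke
def solOuter (xs : List Int) (m : Int) (answer : Int) : Int :=
  match h : xs.getLast? with
  | none => answer
  | some e => solOuter (solInner xs.dropLast (e - m)) m (answer + 1)
termination_by xs.length
decreasing_by
  have hne : xs ≠ [] := by intro hx; simp [hx] at h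
  have h1 := solInner_length_le xs.dropLast (e - m)
  have := List.length_pos_iff.mpr hne
  simp [List.length_dropLast] at h1 ⊢
  omega

def solution (n : Int) (m : Int) (section_ : List Int) : Int :=
  solOuter section_ m 0

-- ===== PORT B =====
-- single `for x in reversed(section)` with state (answer, cover)
def solution_alt (n : Int) (m : Int) (section_ : List Int) : Int :=
  (section_.reverse.foldl
    (fun (st : Int × Option Int) x =>
      match st.2 with
      | none => (st.1 + 1, some (x - m + 1))
      | some c => if x < c then (st.1 + 1, some (x - m + 1)) else st)
    (0, none)).1

-- ===== PRECONDITION & SPEC =====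
def Spec_solution (n : Int) (m : Int) (section_ : List Int) (out : Int) : Prop := out = solution_alt n m section_
instance (n : Int) (m : Int) (section_ : List Int) (out : Int) : Decidable (Spec_solution n m section_ out) := by unfold Spec_solution; infer_instance

-- ===== CLAIM (what is proved, stated in full; the proofs are below) =====
def Claim_equal_solution : Prop := ∀ (n : Int) (m : Int) (section_ : List Int), Dom_solution n m section_ → Spec_solution n m section_ (solution n m section_)

-- ===== LEMMAS AND PROOFS =====

-- A's computation expressed on the reversed list
def fRev (m : Int) : List Int → Int
  | [] => 0
  | x :: rest => 1 + fRev m (rest.dropWhile (fun y => decide (y > x - m)))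
termination_by r => r.length
decreasing_by
  have := List.length_dropWhile_le (fun y => decide (y > x - m)) rest
  simp; omega

-- B's recursion on the reversed list
def gRev (m : Int) : List Int → Option Int → Int
  | [], _ => 0
  | x :: rest, none => 1 + gRev m rest (some (x - m + 1))
  | x :: rest, some c => if x < c then 1 + gRev m rest (some (x - m + 1)) else gRev m rest (some c)

theorem gt_pred_eq (a : Int) :
    (fun y : Int => decide (a + 1 ≤ y)) = (fun y : Int => decide (y > a)) := by
  funext y
  simp only [decide_eq_decide]
  omega

theorem solInner_reverse (xs : List Int) (thr : Int) :
    (solInner xs thr).reverse = xs.reverse.dropWhile (fun y => decide (y > thr)) := by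
  fun_induction solInner xs thr with
  | case1 xs h =>
      have hx : xs = [] := by
        cases xs with
        | nil => rfl
        | cons a t => simp [List.getLast?_eq_none_iff] at h
      simp [hx]
  | case2 xs x h hx ih =>
      have hrev : xs.reverse = x :: xs.dropLast.reverse := by
        have hsplit := (List.dropLast_append_getLast? x h).symm
        calc xs.reverse = (xs.dropLast ++ [x]).reverse := by rw [← hsplit]
        _ = x :: xs.dropLast.reverse := by simp
      rw [ih, hrev, List.dropWhile_cons]
      simp [hx]
  | case3 xs x h hx =>
      have hrev : xs.reverse = x :: xs.dropLast.reverse := by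
        have hsplit := (List.dropLast_append_getLast? x h).symm
        calc xs.reverse = (xs.dropLast ++ [x]).reverse := by rw [← hsplit]
        _ = x :: xs.dropLast.reverse := by simp
      rw [hrev, List.dropWhile_cons]
      simp [hx]

theorem solOuter_eq_fRev (xs : List Int) (m : Int) (a : Int) :
    solOuter xs m a = a + fRev m xs.reverse := by
  fun_induction solOuter xs m a with
  | case1 xs a h =>
      have hx : xs = [] := by
        cases xs with
        | nil => rfl
        | cons b t => simp [List.getLast?_eq_none_iff] at h
      simp [hx, fRev]
  | case2 xs a e h ih =>
      have hrev : xs.reverse = e :: xs.dropLast.reverse := by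
        have hsplit := (List.dropLast_append_getLast? e h).symm
        calc xs.reverse = (xs.dropLast ++ [e]).reverse := by rw [← hsplit]
        _ = e :: xs.dropLast.reverse := by simp
      rw [ih, solInner_reverse, hrev, fRev]
      ring

theorem gRev_some (m : Int) (r : List Int) (c : Int) :
    gRev m r (some c) = fRev m (r.dropWhile (fun y => decide (c ≤ y))) := by
  induction r generalizing c with
  | nil => simp [gRev, fRev]
  | cons x rest ih =>
      rw [List.dropWhile_cons]
      by_cases hx : x < c
      · have hnc : ¬ (c ≤ x) := by omega
        rw [gRev, if_pos hx, ih]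
        simp only [hnc, decide_false, Bool.false_eq_true, if_false]
        rw [fRev]
        have : x - m + 1 = (x - m) + 1 := by ring
        rw [this, gt_pred_eq]
      · have hc : c ≤ x := by omega
        rw [gRev, if_neg hx, ih]
        simp [hc]

theorem gRev_none_eq_fRev (m : Int) (r : List Int) :
    gRev m r none = fRev m r := by
  cases r with
  | nil => simp [gRev, fRev]
  | cons x rest =>
      rw [gRev, gRev_some, fRev]
      have : x - m + 1 = (x - m) + 1 := by ring
      rw [this, gt_pred_eq]

theorem foldB_eq_gRev (m : Int) (r : List Int) (a : Int) (c : Option Int) :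
    (r.foldl
      (fun (st : Int × Option Int) x =>
        match st.2 with
        | none => (st.1 + 1, some (x - m + 1))
        | some c => if x < c then (st.1 + 1, some (x - m + 1)) else st)
      (a, c)).1 = a + gRev m r c := by
  induction r generalizing a c with
  | nil => simp [gRev]
  | cons x rest ih =>
      cases c with
      | none => simp [List.foldl_cons, gRev, ih]; ring
      | some cv =>
          by_cases hx : x < cv
          · simp [List.foldl_cons, gRev, hx, ih]; ring
          · simp [List.foldl_cons, gRev, hx, ih]

-- ===== VERDICT (by name: the statement is the Claim_ definition above) =====
theorem solution_spec : Claim_equal_solution := by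
  intro n m section_ _
  unfold Spec_solution solution solution_alt
  rw [solOuter_eq_fRev, foldB_eq_gRev, gRev_none_eq_fRev]
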